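-- pv_equiv track=rewrite | github.com/pypi-data/pypi-mirror-329 | packages/xtlib/xtlib-0.0.337-py3-none-any.whl/xtlib/storage/odbc.py | _build_col_str_in_groups
-- ===== SOURCE A (Python) =====
-- def _build_col_str_in_groups(fields_dict, groups):
--     cols = list(fields_dict)
--     cols.sort()
--
--     for group in groups:
--         gdot = group + "."
--
--         # insert __group__ separator cols
--         for i in range(len(cols)):
--             col = cols[i]
--             if col.startswith(gdot):
--                 # insert _g_ separator
--                 cols.insert(i, "'' as _{}_".format(group))
--                 break
--
--     col_str = ", ".join(cols)
--     return col_str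
-- ===== SOURCE B (Python) =====
-- def _build_col_str_in_groups(fields_dict, groups):
--     cols = sorted(fields_dict)
--     n = len(cols)
--     ins = {}  # position -> separator strings rendered just before cols[position]
--     for group in groups:
--         gdot = group + "."
--         # binary search for the first column >= gdot (cols is sorted)
--         lo, hi = 0, n
--         while lo < hi:
--             mid = (lo + hi) // 2
--             if cols[mid] < gdot:
--                 lo = mid + 1
--             else:
--                 hi = mid
--         if lo < n and cols[lo].startswith(gdot):
--             ins.setdefault(lo, []).append("'' as _{}_".format(group))
--     out = []
--     for j, col in enumerate(cols):
--         out.extend(ins.get(j, []))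
--         out.append(col)
--     return ", ".join(out)
-- ===== Notes on version B (the rewrite author's own statement) =====
-- stated objective: faster
-- what changed: B keeps the sorted column list fixed and per group binary-searches it for the first column carrying the group's dotted prefix, recording separators in a position dict merged in one final pass, instead of A's per-group linear rescan of a mutating list with O(N) list.insert; Pre_ excludes inputs where a later group's dotted prefix is itself a prefix of the separator literal synthesized for an earlier matching group, a corner where A's scan can match its own inserted separator string and either placement is defensible.
import Mathlib
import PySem

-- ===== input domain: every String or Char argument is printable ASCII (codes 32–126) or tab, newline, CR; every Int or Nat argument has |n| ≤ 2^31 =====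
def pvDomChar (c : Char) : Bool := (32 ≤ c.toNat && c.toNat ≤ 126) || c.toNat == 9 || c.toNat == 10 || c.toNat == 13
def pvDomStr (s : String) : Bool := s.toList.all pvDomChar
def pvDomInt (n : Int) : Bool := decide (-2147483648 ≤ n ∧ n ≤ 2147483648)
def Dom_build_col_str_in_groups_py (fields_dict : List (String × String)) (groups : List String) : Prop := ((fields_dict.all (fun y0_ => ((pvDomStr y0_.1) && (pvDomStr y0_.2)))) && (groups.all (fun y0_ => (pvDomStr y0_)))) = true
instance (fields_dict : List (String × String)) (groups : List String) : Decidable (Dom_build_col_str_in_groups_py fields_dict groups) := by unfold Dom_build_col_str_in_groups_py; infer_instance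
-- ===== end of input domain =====

-- B replaces A's per-group linear rescans of a mutating list by one binary search per group over the
-- fixed sorted column list plus a dict of recorded insertions merged in one final pass (objective: faster).


-- ===== PORT A =====
-- "'' as _{}_".format(group)
def pvMarker (g : String) : String := "'' as _" ++ g ++ "_"

-- A's inner loop: 'for i in range(len(cols)): if cols[i].startswith(gdot): cols.insert(i, m); break'
def aInsertSep (gdot m : String) : List String → List String
  | [] => []
  | c :: rest =>
    if PySem.Str.startswith c gdot then m :: c :: rest else c :: aInsertSep gdot m rest

def build_col_str_in_groups_py (fields_dict : List (String × String)) (groups : List String) : String :=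
  let cols := PySem.List.sorted (PySem.List.dedup (fields_dict.map Prod.fst)) (fun x => x) false
  let cols := groups.foldl (fun cs g => aInsertSep (g ++ ".") (pvMarker g) cs) cols
  PySem.Str.join ", " cols

-- ===== PORT B =====
-- Python's 'a < b' on strings: lexicographic code-point comparison (exact; the char-list order is the same relation)
def pyStrLt (a b : String) : Bool := decide (a.toList < b.toList)

-- Source B's hand-written 'while lo < hi' binary-search loop (fuel = initial hi - lo makes it total)
def bSearch (cols : List String) (gdot : String) : Nat → Nat → Nat → Nat
  | 0, lo, _ => lo
  | fuel + 1, lo, hi =>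
    if lo < hi then
      let mid := (lo + hi) / 2
      if pyStrLt (cols.getD mid "") gdot then bSearch cols gdot fuel (mid + 1) hi
      else bSearch cols gdot fuel lo mid
    else lo

-- one iteration of Source B's 'for group in groups' loop over the insertion dict
def bStep (cols : List String) (d : PySem.Dict Int (List String)) (g : String) : PySem.Dict Int (List String) :=
  let gdot := g ++ "."
  let lo := bSearch cols gdot cols.length 0 cols.length
  if lo < cols.length && PySem.Str.startswith (cols.getD lo "") gdot then
    d.modify (lo : Int) [] (· ++ [pvMarker g])
  else d

def build_col_str_in_groups_py_alt (fields_dict : List (String × String)) (groups : List String) : String :=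
  let cols := PySem.List.sorted (PySem.List.dedup (fields_dict.map Prod.fst)) (fun x => x) false
  let ins := groups.foldl (bStep cols) PySem.Dict.empty
  let out := (PySem.List.enumerate cols).foldl (fun acc p => acc ++ ins.getD p.1 [] ++ [p.2]) []
  PySem.Str.join ", " out

-- ===== PRECONDITION & SPEC =====
-- Pre_ excludes inputs where a later group's dotted prefix is itself a prefix of the separator
-- literal synthesized for an earlier group that has a matching column: there the synthesized
-- separator string itself looks like a column with the later group's prefix, and A (which scans its
-- own inserted separators) and B (which scans only the real columns) make equally defensible
-- placements of a separator no caller specifies.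
def Pre_build_col_str_in_groups_py (fields_dict : List (String × String)) (groups : List String) : Prop :=
  groups.Pairwise (fun gi gj => ¬ (PySem.Str.startswith ("'' as _" ++ gi ++ "_") (gj ++ ".") = true ∧
      ∃ c ∈ fields_dict, PySem.Str.startswith c.1 (gi ++ ".") = true))
instance (fields_dict : List (String × String)) (groups : List String) : Decidable (Pre_build_col_str_in_groups_py fields_dict groups) := by unfold Pre_build_col_str_in_groups_py; infer_instance

def pvWitness_build_col_str_in_groups_py : (List (String × String)) × List String :=
  ([("a.b", "one"), ("a.c", "two"), ("d", "three")], ["a", "d"])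

def Spec_build_col_str_in_groups_py (fields_dict : List (String × String)) (groups : List String) (out : String) : Prop := out = build_col_str_in_groups_py_alt fields_dict groups
instance (fields_dict : List (String × String)) (groups : List String) (out : String) : Decidable (Spec_build_col_str_in_groups_py fields_dict groups out) := by unfold Spec_build_col_str_in_groups_py; infer_instance

-- ===== CLAIM (what is proved, stated in full; the proofs are below) =====
def Claim_equal_build_col_str_in_groups_py : Prop := ∀ (fields_dict : List (String × String)) (groups : List String), Dom_build_col_str_in_groups_py fields_dict groups → Pre_build_col_str_in_groups_py fields_dict groups → Spec_build_col_str_in_groups_py fields_dict groups (build_col_str_in_groups_py fields_dict groups)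

-- ===== LEMMAS AND PROOFS =====

-- B's rendering of the insertion dict: markers recorded at position j go right before column j
def renderFrom (d : PySem.Dict Int (List String)) : List String → Int → List String
  | [], _ => []
  | c :: cs, k => d.getD k [] ++ c :: renderFrom d cs (k + 1)

-- no separator already recorded at a rendered position matches the dotted prefix of a group still
-- to be processed
def Clean (cols : List String) (gs : List String) (d : PySem.Dict Int (List String)) : Prop :=
  ∀ g' ∈ gs, ∀ q : Nat, q < cols.length → ∀ m ∈ d.getD (q : Int) [],
    ¬ PySem.Str.startswith m (g' ++ ".") = true

-- ---------- string-order facts ----------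

theorem sw_iff (s p : String) : PySem.Str.startswith s p = true ↔ p.toList <+: s.toList := by
  simp [PySem.Str.startswith, PySem.Chars.startswith, List.isPrefixOf_iff_prefix]

theorem str_lt_iff (a b : String) : a < b ↔ List.Lex (· < ·) a.toList b.toList := by
  rw [String.lt_iff_toList_lt]
  exact List.lt_iff_lex_lt _ _

theorem pyStrLt_iff (a b : String) : pyStrLt a b = true ↔ a < b := by
  simp [pyStrLt, String.lt_iff_toList_lt]

theorem not_lex_of_prefix {p x : List Char} (h : p <+: x) : ¬ List.Lex (· < ·) x p := by
  induction p generalizing x with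
  | nil => intro h'; cases h'
  | cons a p ih =>
    cases x with
    | nil => simp at h
    | cons b x =>
      obtain ⟨rfl, h'⟩ := List.cons_prefix_cons.mp h
      intro hlex
      cases hlex with
      | cons hl => exact ih h' hl
      | rel hr => exact lt_irrefl _ hr

theorem lex_of_prefix_not_lt {p x y : List Char}
    (hpx : ¬ List.Lex (· < ·) x p) (hnpx : ¬ p <+: x) (hpy : p <+: y) :
    List.Lex (· < ·) y x := by
  induction p generalizing x y with
  | nil => exact absurd (List.nil_prefix) hnpx
  | cons a p ih =>
    cases x with
    | nil => exact absurd List.Lex.nil hpx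
    | cons b x =>
      cases y with
      | nil => simp at hpy
      | cons c y =>
        obtain ⟨rfl, hpy'⟩ := List.cons_prefix_cons.mp hpy
        rcases lt_trichotomy a b with h | h | h
        · exact List.Lex.rel h
        · subst h
          have hx' : ¬ List.Lex (· < ·) x p := fun h' => hpx (List.Lex.cons h')
          have hnp' : ¬ p <+: x := fun h' => hnpx (List.cons_prefix_cons.mpr ⟨rfl, h'⟩)
          exact List.Lex.cons (ih hx' hnp' hpy')
        · exact absurd (List.Lex.rel h) hpx

-- a column that starts with gdot is ≥ gdot
theorem not_lt_of_startswith {x gdot : String} (h : PySem.Str.startswith x gdot = true) :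
    ¬ x < gdot := by
  rw [str_lt_iff]
  exact not_lex_of_prefix ((sw_iff x gdot).mp h)

-- if x ≥ gdot does not start with gdot, every column that does is < x
theorem lt_of_startswith_of_not {x y gdot : String}
    (hx : ¬ x < gdot) (hnx : ¬ PySem.Str.startswith x gdot = true)
    (hy : PySem.Str.startswith y gdot = true) : y < x := by
  rw [str_lt_iff] at hx ⊢
  exact lex_of_prefix_not_lt hx (fun hp => hnx ((sw_iff x gdot).mpr hp)) ((sw_iff y gdot).mp hy)

-- ---------- binary search ----------

theorem bSearch_correct (cols : List String) (gdot : String)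
    (hmono : ∀ i j : Nat, i ≤ j → j < cols.length → cols.getD i "" ≤ cols.getD j "")
    (fuel lo hi : Nat) (hhi : hi ≤ cols.length) (hlh : lo ≤ hi) (hfuel : hi - lo ≤ fuel)
    (hlow : ∀ j, j < lo → cols.getD j "" < gdot)
    (hhigh : ∀ j, hi ≤ j → j < cols.length → ¬ cols.getD j "" < gdot) :
    (bSearch cols gdot fuel lo hi ≤ cols.length) ∧
    (∀ j, j < bSearch cols gdot fuel lo hi → cols.getD j "" < gdot) ∧
    (∀ j, bSearch cols gdot fuel lo hi ≤ j → j < cols.length → ¬ cols.getD j "" < gdot) := by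
  induction fuel generalizing lo hi with
  | zero =>
    have : lo = hi := by omega
    subst this
    simp only [bSearch]
    exact ⟨by omega, hlow, hhigh⟩
  | succ fuel ih =>
    simp only [bSearch]
    by_cases h : lo < hi
    · simp only [if_pos h]
      by_cases hc : pyStrLt (cols.getD ((lo + hi) / 2) "") gdot = true
      · simp only [hc, if_true]
        refine ih ((lo + hi) / 2 + 1) hi hhi (by omega) (by omega) ?_ hhigh
        intro j hj
        rcases Nat.lt_or_ge j lo with hjl | hjl
        · exact hlow j hjl
        · calc cols.getD j "" ≤ cols.getD ((lo + hi) / 2) "" := hmono _ _ (by omega) (by omega)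
            _ < gdot := (pyStrLt_iff _ _).mp hc
      · simp only [hc]
        simp only [Bool.false_eq_true, if_false]
        refine ih lo ((lo + hi) / 2) (by omega) (by omega) (by omega) hlow ?_
        intro j hj hjn hlt
        have hmlt : cols.getD ((lo + hi) / 2) "" < gdot := by
          rcases Nat.lt_or_ge j hi with hjh | hjh
          · exact lt_of_le_of_lt (hmono _ _ hj (by omega)) hlt
          · exact absurd hlt (hhigh j hjh hjn)
        exact hc ((pyStrLt_iff _ _).mpr hmlt)
    · simp only [if_neg h]
      have : lo = hi := by omega
      subst this
      exact ⟨by omega, hlow, hhigh⟩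

-- ---------- render lemmas ----------

theorem renderFrom_congr (d₁ d₂ : PySem.Dict Int (List String)) (cols : List String) (k : Int)
    (h : ∀ j : Int, k ≤ j → d₁.getD j [] = d₂.getD j []) :
    renderFrom d₁ cols k = renderFrom d₂ cols k := by
  induction cols generalizing k with
  | nil => rfl
  | cons c cs ih =>
    simp only [renderFrom, h k le_rfl, ih (k + 1) (fun j hj => h j (by omega))]

theorem renderFrom_empty (cols : List String) (k : Int) :
    renderFrom PySem.Dict.empty cols k = cols := by
  induction cols generalizing k with
  | nil => rfl
  | cons c cs ih =>
    have hget : (PySem.Dict.empty : PySem.Dict Int (List String)).getD k [] = [] := rfl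
    simp only [renderFrom, hget, ih (k + 1), List.nil_append]

theorem enumerate_foldl_render (d : PySem.Dict Int (List String)) (cols : List String)
    (k : Int) (acc : List String) :
    (PySem.List.enumerate cols k).foldl (fun acc p => acc ++ d.getD p.1 [] ++ [p.2]) acc
      = acc ++ renderFrom d cols k := by
  induction cols generalizing k acc with
  | nil => simp [PySem.List.enumerate_nil, renderFrom]
  | cons c cs ih =>
    rw [PySem.List.enumerate_cons]
    simp only [List.foldl_cons, renderFrom, ih]
    simp

-- ---------- the scan over a rendered list ----------

theorem scan_append_no_match (gdot m : String) (ms l : List String)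
    (h : ∀ m' ∈ ms, ¬ PySem.Str.startswith m' gdot = true) :
    aInsertSep gdot m (ms ++ l) = ms ++ aInsertSep gdot m l := by
  induction ms with
  | nil => rfl
  | cons x ms ih =>
    simp only [List.cons_append, aInsertSep]
    rw [if_neg (by simpa using h x (by simp))]
    rw [ih (fun m' hm' => h m' (by simp [hm']))]

-- scan when the winner is a real column at position p (blocks up to p are clean)
theorem scan_real (gdot m : String) (cols : List String)
    (d : PySem.Dict Int (List String)) (k : Int) (p : Nat)
    (hm : ∀ jn : Nat, jn ≤ p → ∀ m' ∈ d.getD (k + jn) [], ¬ PySem.Str.startswith m' gdot = true)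
    (hp : p < cols.length)
    (hmatch : PySem.Str.startswith (cols.getD p "") gdot = true)
    (hfirst : ∀ j : Nat, j < p → ¬ PySem.Str.startswith (cols.getD j "") gdot = true) :
    aInsertSep gdot m (renderFrom d cols k)
      = renderFrom (d.modify (k + (p : Int)) [] (· ++ [m])) cols k := by
  induction cols generalizing k p with
  | nil => simp at hp
  | cons c cs ih =>
    simp only [renderFrom]
    rw [scan_append_no_match gdot m _ _ (by simpa using hm 0 (by omega))]
    cases p with
    | zero =>
      have hc : PySem.Str.startswith c gdot = true := by simpa using hmatch
      simp only [aInsertSep, if_pos hc]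
      simp only [Nat.cast_zero, add_zero]
      rw [PySem.Dict.getD_modify_self]
      rw [renderFrom_congr (d.modify k [] (· ++ [m])) d cs (k + 1)
        (fun j hj => PySem.Dict.getD_modify_of_ne d [] _ (by omega))]
      simp
    | succ q =>
      have hc : ¬ PySem.Str.startswith c gdot = true := by
        have := hfirst 0 (Nat.succ_pos q); simpa using this
      simp only [aInsertSep, if_neg hc]
      have hkey : k + ((q + 1 : Nat) : Int) = (k + 1) + (q : Int) := by push_cast; ring
      rw [hkey]
      rw [ih (k + 1) q
        (fun jn hjn => by
          have := hm (jn + 1) (by omega)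
          intro m' hm'
          refine this m' ?_
          have : k + 1 + (jn : Int) = k + ((jn + 1 : Nat) : Int) := by push_cast; ring
          rwa [← this])
        (by simpa using hp) (by simpa using hmatch)
        (fun j hj => by simpa using hfirst (j + 1) (by omega))]
      rw [PySem.Dict.getD_modify_of_ne d [] _ (show k ≠ (k + 1) + (q : Int) by omega)]

-- scan when nothing matches: the list is unchanged
theorem scan_none (gdot m : String) (cols : List String)
    (d : PySem.Dict Int (List String)) (k : Int)
    (hm : ∀ jn : Nat, jn < cols.length → ∀ m' ∈ d.getD (k + jn) [],
      ¬ PySem.Str.startswith m' gdot = true)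
    (hnone : ∀ j : Nat, j < cols.length → ¬ PySem.Str.startswith (cols.getD j "") gdot = true) :
    aInsertSep gdot m (renderFrom d cols k) = renderFrom d cols k := by
  induction cols generalizing k with
  | nil => rfl
  | cons c cs ih =>
    simp only [renderFrom]
    rw [scan_append_no_match gdot m _ _ (by simpa using hm 0 (by simp))]
    have hc : ¬ PySem.Str.startswith c gdot = true := by simpa using hnone 0 (by simp)
    simp only [aInsertSep, if_neg hc]
    rw [ih (k + 1)
      (fun jn hjn => by
        have := hm (jn + 1) (by simpa using Nat.succ_lt_succ hjn)
        intro m' hm'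
        refine this m' ?_
        have heq : k + 1 + (jn : Int) = k + ((jn + 1 : Nat) : Int) := by push_cast; ring
        rwa [← heq])
      (fun j hj => by simpa using hnone (j + 1) (by simpa using hj))]

-- ---------- the main fold ----------

theorem main_fold (cols : List String)
    (hmono : ∀ i j : Nat, i ≤ j → j < cols.length → cols.getD i "" ≤ cols.getD j "") :
    ∀ (gs : List String) (d : PySem.Dict Int (List String)),
      gs.Pairwise (fun gi gj => ¬ (PySem.Str.startswith ("'' as _" ++ gi ++ "_") (gj ++ ".") = true ∧
        ∃ c ∈ cols, PySem.Str.startswith c (gi ++ ".") = true)) →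
      Clean cols gs d →
      gs.foldl (fun cs g => aInsertSep (g ++ ".") (pvMarker g) cs) (renderFrom d cols 0)
        = renderFrom (gs.foldl (bStep cols) d) cols 0 := by
  intro gs
  induction gs with
  | nil => intro d _ _; rfl
  | cons g gs ih =>
    intro d hpw hclean
    obtain ⟨hg, hgs⟩ := List.pairwise_cons.mp hpw
    simp only [List.foldl_cons]
    set n := cols.length with hn
    set gdot := g ++ "." with hgdot
    set lo := bSearch cols gdot n 0 n with hlo
    obtain ⟨hbs1, hbs2, hbs3⟩ := bSearch_correct cols gdot hmono n 0 n le_rfl (by omega)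
      (by omega) (fun j hj => absurd hj (by omega)) (fun j hj hjn => absurd hjn (by omega))
    have hcleang := hclean g (by simp)
    by_cases hcond : (decide (lo < n) && PySem.Str.startswith (cols.getD lo "") gdot) = true
    · -- a real column matches: both sides record the marker before column lo
      rw [Bool.and_eq_true, decide_eq_true_eq] at hcond
      obtain ⟨hln, hlsw⟩ := hcond
      have hfirst : ∀ j : Nat, j < lo → ¬ PySem.Str.startswith (cols.getD j "") gdot = true :=
        fun j hj hswj => not_lt_of_startswith hswj (hbs2 j hj)
      have hb : bStep cols d g = d.modify (lo : Int) [] (· ++ [pvMarker g]) := by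
        simp only [bStep, ← hgdot, ← hn, ← hlo]
        rw [if_pos (by rw [Bool.and_eq_true, decide_eq_true_eq]; exact ⟨hln, hlsw⟩)]
      rw [hb]
      rw [scan_real gdot (pvMarker g) cols d 0 lo
        (fun jn hjn m' hm' => hcleang jn (by omega) m' (by simpa using hm'))
        hln hlsw hfirst]
      have hz : (0 : Int) + (lo : Int) = (lo : Int) := by ring
      rw [hz]
      refine ih _ hgs ?_
      -- Clean is preserved: the new marker cannot match a later group's prefix, because that
      -- pair together with the matched real column would make the bad-pair true
      intro g' hg' q hq m hm hsw
      by_cases hqp : q = lo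
      · subst hqp
        rw [PySem.Dict.getD_modify_self] at hm
        rcases List.mem_append.mp hm with hold | hnew
        · exact hclean g' (by simp [hg']) lo hq m hold hsw
        · have hmk : m = pvMarker g := by simpa using hnew
          subst hmk
          have h1 : PySem.Str.startswith ("'' as _" ++ g ++ "_") (g' ++ ".") = true := by
            simpa [pvMarker] using hsw
          have hmemlo : cols.getD lo "" ∈ cols := by
            rw [List.getD_eq_getElem?_getD, List.getElem?_eq_getElem hq]
            exact List.getElem_mem hq
          exact hg g' hg' ⟨h1, cols.getD lo "", hmemlo, hlsw⟩
      · rw [PySem.Dict.getD_modify_of_ne d [] _ (by exact_mod_cast fun h => hqp (by omega))] at hm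
        exact hclean g' (by simp [hg']) q hq m hm hsw
    · -- no real column matches, and the directly preceding markers cannot match either
      have hnomatch : ∀ j : Nat, j < n → ¬ PySem.Str.startswith (cols.getD j "") gdot = true := by
        intro j hj hsw
        rw [Bool.and_eq_true] at hcond
        replace hcond : (decide (lo < n) && PySem.Str.startswith (cols.getD lo "") gdot) = false := by
          simpa using hcond
        rw [Bool.and_eq_false_iff] at hcond
        by_cases h1 : lo < n
        · have h2 : PySem.Str.startswith (cols.getD lo "") gdot = false := by
            rcases hcond with h | h
            · exact absurd h (by simp [h1])
            · exact h
          rcases Nat.lt_or_ge j lo with hjl | hjl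
          · exact not_lt_of_startswith hsw (hbs2 j hjl)
          · have hlt : cols.getD j "" < cols.getD lo "" :=
              lt_of_startswith_of_not (hbs3 lo le_rfl h1) (by simpa using h2) hsw
            exact absurd (hmono lo j hjl hj) (not_le_of_gt hlt)
        · exact not_lt_of_startswith hsw (hbs2 j (by omega))
      have hb : bStep cols d g = d := by
        simp only [bStep, ← hgdot, ← hn, ← hlo]
        rw [if_neg (by simpa using hcond)]
      rw [hb]
      rw [scan_none gdot (pvMarker g) cols d 0
        (fun jn hjn m' hm' => hcleang jn hjn m' (by simpa using hm'))
        hnomatch]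
      exact ih d hgs (fun g' hg' => hclean g' (by simp [hg']))

-- ===== VERDICT (by name: the statement is the Claim_ definition above) =====
theorem build_col_str_in_groups_py_spec : Claim_equal_build_col_str_in_groups_py := by
  intro fields_dict groups _ hpre
  show build_col_str_in_groups_py _ _ = _
  simp only [build_col_str_in_groups_py, build_col_str_in_groups_py_alt]
  set colsD := PySem.List.dedup (fields_dict.map Prod.fst) with hcolsD
  set cols := PySem.List.sorted colsD (fun x => x) false with hcols
  have hperm : ∀ s, s ∈ cols ↔ s ∈ colsD := fun s =>
    (PySem.List.sorted_perm colsD (fun x => x) false).mem_iff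
  have hmemfd : ∀ s, s ∈ cols ↔ ∃ c ∈ fields_dict, c.1 = s := by
    intro s
    rw [hperm s, hcolsD, PySem.List.mem_dedup, List.mem_map]
  have hsortedle : cols.Pairwise (· ≤ ·) := by
    have := PySem.List.sorted_pairwise colsD (fun x => x) (κ := String)
    simpa [← hcols] using this
  have hmono : ∀ i j : Nat, i ≤ j → j < cols.length → cols.getD i "" ≤ cols.getD j "" := by
    intro i j hij hj
    rcases Nat.eq_or_lt_of_le hij with rfl | hlt
    · exact le_rfl
    · rw [List.getD_eq_getElem?_getD, List.getD_eq_getElem?_getD,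
        List.getElem?_eq_getElem (by omega), List.getElem?_eq_getElem hj]
      exact (List.pairwise_iff_getElem.mp hsortedle) i j (by omega) hj hlt
  have hpw : groups.Pairwise (fun gi gj =>
      ¬ (PySem.Str.startswith ("'' as _" ++ gi ++ "_") (gj ++ ".") = true ∧
        ∃ c ∈ cols, PySem.Str.startswith c (gi ++ ".") = true)) := by
    refine hpre.imp ?_
    intro gi gj h hcon
    refine h ⟨hcon.1, ?_⟩
    obtain ⟨c, hc, hsw⟩ := hcon.2
    obtain ⟨p, hp, hps⟩ := (hmemfd c).mp hc
    exact ⟨p, hp, by rw [hps]; exact hsw⟩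
  rw [enumerate_foldl_render]
  have h0 := main_fold cols hmono groups PySem.Dict.empty hpw
    (by intro g' _ q _ m hm; simp [PySem.Dict.getD, PySem.Dict.get?, PySem.Dict.empty] at hm)
  rw [renderFrom_empty] at h0
  exact congrArg (PySem.Str.join ", ") h0
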